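-- pv_equiv track=rewrite | github.com/TiurinMikhail/DI-Bootcamp | Week1/Day5/Challenges/Challenges.py | length_over_k
-- ===== SOURCE A (Python) =====
-- def length_over_k(sentence,k):
--     sum_over_k = 0
--     sentence = sentence.replace('.', '').replace(',', '').replace('?', '').replace('!', '').replace(':', '')
--     sentence = sentence.split()
--     for word in sentence:
--         if len(word) > k:
--             sum_over_k += 1
--     return sum_over_k
-- ===== SOURCE B (Python) =====
-- def length_over_k(sentence, k):
--     total = 0
--     cur = 0
--     for ch in sentence:
--         if ch in '.,?!:':
--             continue
--         if ch.isspace():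
--             if cur > 0 and cur > k:
--                 total += 1
--             cur = 0
--         else:
--             cur += 1
--     if cur > 0 and cur > k:
--         total += 1
--     return total
-- ===== Notes on version B (the rewrite author's own statement) =====
-- stated objective: alternative
-- what changed: B replaces A's pipeline (five whole-string replace passes, then split() into a word list, then a counting loop) by one single pass over the characters that skips punctuation, tracks the current word length and finalizes at whitespace boundaries and at end of input.
import Mathlib
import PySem

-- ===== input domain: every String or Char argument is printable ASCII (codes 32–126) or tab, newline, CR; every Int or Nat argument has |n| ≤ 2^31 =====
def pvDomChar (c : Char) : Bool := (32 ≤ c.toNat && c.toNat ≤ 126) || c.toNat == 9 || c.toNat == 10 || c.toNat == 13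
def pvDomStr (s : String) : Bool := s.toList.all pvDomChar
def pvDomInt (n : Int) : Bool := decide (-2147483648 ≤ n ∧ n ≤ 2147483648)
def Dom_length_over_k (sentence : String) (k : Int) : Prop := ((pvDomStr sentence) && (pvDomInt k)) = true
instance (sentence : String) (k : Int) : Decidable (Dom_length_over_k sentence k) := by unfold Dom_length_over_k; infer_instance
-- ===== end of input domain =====

-- B replaces A's build-stripped-string-then-split pipeline by a single pass over the characters
-- keeping only a current-word length and a running total (objective: alternative, no intermediate lists).

-- ===== PORT A =====
def length_over_k (sentence : String) (k : Int) : Int :=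
  let s2 := PySem.Str.replace (PySem.Str.replace (PySem.Str.replace (PySem.Str.replace
              (PySem.Str.replace sentence "." "") "," "") "?" "") "!" "") ":" ""
  let ws := PySem.Str.split₀ s2
  ws.foldl (fun sum_over_k word => if PySem.Str.len word > k then sum_over_k + 1 else sum_over_k) 0

-- ===== PORT B =====
-- `ch in '.,?!:'` on a single character is an explicit membership test (exact for 1-char ch):
def bPunct (c : Char) : Bool := c == '.' || c == ',' || c == '?' || c == '!' || c == ':'

def length_over_k_alt (sentence : String) (k : Int) : Int :=
  let st := sentence.toList.foldl (fun (st : Int × Int) ch =>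
      if bPunct ch then st
      else if PySem.Chars.isspace ch then (0, if 0 < st.1 ∧ k < st.1 then st.2 + 1 else st.2)
      else (st.1 + 1, st.2)) (0, 0)
  if 0 < st.1 ∧ k < st.1 then st.2 + 1 else st.2

-- ===== PRECONDITION & SPEC =====
def Spec_length_over_k (sentence : String) (k : Int) (out : Int) : Prop := out = length_over_k_alt sentence k
instance (sentence : String) (k : Int) (out : Int) : Decidable (Spec_length_over_k sentence k out) := by unfold Spec_length_over_k; infer_instance

-- ===== CLAIM (what is proved, stated in full; the proofs are below) =====
def Claim_equal_length_over_k : Prop := ∀ (sentence : String) (k : Int), Dom_length_over_k sentence k → Spec_length_over_k sentence k (length_over_k sentence k)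

-- ===== LEMMAS AND PROOFS =====

-- replacing a single character by "" is exactly a filter
lemma replace_go_single (c : Char) : ∀ (l : List Char) (fuel : Nat) (acc : List Char),
    l.length ≤ fuel →
    PySem.Chars.replace.go [c] [] fuel l acc = acc.reverse ++ l.filter (fun x => !(x == c)) := by
  intro l
  induction l with
  | nil => intro fuel acc _; cases fuel <;> simp [PySem.Chars.replace.go]
  | cons x t ih =>
    intro fuel acc h
    cases fuel with
    | zero => simp at h
    | succ f =>
      simp only [PySem.Chars.replace.go]
      by_cases hx : x = c
      · subst hx
        simp [List.isPrefixOf, ih f acc (by simpa using h)]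
      · have : [c].isPrefixOf (x :: t) = false := by
          simp [List.isPrefixOf, Ne.symm hx]
        simp [this, ih f (x :: acc) (by simpa using h), hx]

lemma replace_single (cs : List Char) (c : Char) :
    PySem.Chars.replace cs [c] [] = cs.filter (fun x => !(x == c)) := by
  simp [PySem.Chars.replace, replace_go_single c cs cs.length [] le_rfl]

-- the five successive single-character removals are one filter by bPunct
lemma filter_chain (cs : List Char) :
    (((((cs.filter (fun x => !(x == '.'))).filter (fun x => !(x == ','))).filter
        (fun x => !(x == '?'))).filter (fun x => !(x == '!'))).filter (fun x => !(x == ':')))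
    = cs.filter (fun c => !bPunct c) := by
  simp only [List.filter_filter]
  apply List.filter_congr
  intro c _
  cases h1 : c == '.' <;> cases h2 : c == ',' <;> cases h3 : c == '?' <;>
    cases h4 : c == '!' <;> cases h5 : c == ':' <;> simp [bPunct, h1, h2, h3, h4, h5]

-- split₀.go's accumulator distributes
lemma split_go_acc : ∀ (ds cur : List Char) (acc : List (List Char)),
    PySem.Chars.split₀.go ds cur acc = acc.reverse ++ PySem.Chars.split₀.go ds cur [] := by
  intro ds
  induction ds with
  | nil =>
    intro cur acc
    by_cases h : cur.isEmpty <;> simp [PySem.Chars.split₀.go, h]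
  | cons c rest ih =>
    intro cur acc
    by_cases hs : PySem.Chars.isspace c
    · by_cases h : cur.isEmpty
      · simp only [PySem.Chars.split₀.go, hs, h, if_true]
        exact ih [] acc
      · simp only [PySem.Chars.split₀.go, hs, h, if_true, if_false, Bool.false_eq_true]
        rw [ih [] (cur.reverse :: acc), ih [] [cur.reverse]]
        simp
    · simp only [PySem.Chars.split₀.go, hs, Bool.false_eq_true, if_false]
      rw [ih (c :: cur) acc]

-- B's whitespace/other step and finalization, as named helpers for the invariant
def stepS (k : Int) (st : Int × Int) (c : Char) : Int × Int :=
  if PySem.Chars.isspace c then (0, if 0 < st.1 ∧ k < st.1 then st.2 + 1 else st.2)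
  else (st.1 + 1, st.2)

def finA (k : Int) (st : Int × Int) : Int :=
  if 0 < st.1 ∧ k < st.1 then st.2 + 1 else st.2

-- punctuation characters are skipped by B's step, so the B fold runs over the filtered list
lemma fold_skip_punct (k : Int) : ∀ (cs : List Char) (st : Int × Int),
    cs.foldl (fun (st : Int × Int) ch =>
      if bPunct ch then st
      else if PySem.Chars.isspace ch then (0, if 0 < st.1 ∧ k < st.1 then st.2 + 1 else st.2)
      else (st.1 + 1, st.2)) st
    = (cs.filter (fun c => !bPunct c)).foldl (stepS k) st := by
  intro cs
  induction cs with
  | nil => intro st; rfl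
  | cons c rest ih =>
    intro st
    by_cases hp : bPunct c
    · simp [List.filter_cons, hp, ih]
    · simp [List.filter_cons, hp, ih, stepS]

-- the single-pass invariant: finalizing B's fold counts the words of split₀.go longer than k
lemma main_inv (k : Int) : ∀ (ds cur : List Char) (t : Int),
    finA k (ds.foldl (stepS k) ((cur.length : Int), t))
    = t + ((PySem.Chars.split₀.go ds cur []).countP (fun w => decide (k < (w.length : Int))) : Int) := by
  intro ds
  induction ds with
  | nil =>
    intro cur t
    by_cases h : cur.isEmpty
    · have hc : cur = [] := by simpa [List.isEmpty_iff] using h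
      subst hc
      simp [PySem.Chars.split₀.go, finA]
    · have hne : cur ≠ [] := by simpa [List.isEmpty_iff] using h
      have hpos : 0 < (cur.length : Int) := by
        have := List.length_pos_iff.mpr hne; exact_mod_cast this
      by_cases hk : k < (cur.length : Int)
      · simp [PySem.Chars.split₀.go, h, hne, hpos, hk, finA, List.countP_cons]
      · simp [PySem.Chars.split₀.go, h, hne, hpos, hk, finA, List.countP_cons]
  | cons c rest ih =>
    intro cur t
    by_cases hs : PySem.Chars.isspace c
    · by_cases h : cur.isEmpty
      · have hc : cur = [] := by simpa [List.isEmpty_iff] using h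
        subst hc
        simp only [PySem.Chars.split₀.go, hs, if_true, List.isEmpty_nil,
          List.foldl_cons, stepS, List.length_nil, Int.natCast_zero]
        rw [show (if (0:Int) < 0 ∧ k < 0 then t + 1 else t) = t by simp]
        simpa using ih [] t
      · have hne : cur ≠ [] := by simpa [List.isEmpty_iff] using h
        have hpos : 0 < (cur.length : Int) := by
          have := List.length_pos_iff.mpr hne; exact_mod_cast this
        simp only [PySem.Chars.split₀.go, hs, h, if_true, if_false, Bool.false_eq_true,
          List.foldl_cons, stepS]
        rw [split_go_acc rest [] [cur.reverse]]
        by_cases hk : k < (cur.length : Int)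
        · rw [show (if 0 < (cur.length:Int) ∧ k < (cur.length:Int) then t+1 else t) = t+1 by simp [hpos, hk, hne]]
          have h2 := ih [] (t+1)
          simp only [List.length_nil, Int.natCast_zero] at h2
          rw [h2]
          simp [List.countP_cons, hk, hne]
          ring
        · rw [show (if 0 < (cur.length:Int) ∧ k < (cur.length:Int) then t+1 else t) = t by simp [hk]]
          have h2 := ih [] t
          simp only [List.length_nil, Int.natCast_zero] at h2
          rw [h2]
          simp [List.countP_cons, hk, hne]
    · simp only [PySem.Chars.split₀.go, hs, Bool.false_eq_true, if_false,
        List.foldl_cons, stepS]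
      have h2 := ih (c :: cur) t
      simp only [List.length_cons] at h2
      rw [show ((cur.length : Int) + 1) = ((cur.length + 1 : Nat) : Int) by push_cast; ring]
      exact h2

-- A's result as a count over the filtered character list
lemma portA_eq_count (sentence : String) (k : Int) :
    length_over_k sentence k
    = ((PySem.Chars.split₀ (sentence.toList.filter (fun c => !bPunct c))).countP
        (fun w => decide (k < (w.length : Int))) : Int) := by
  unfold length_over_k
  rw [show (fun (sum_over_k : Int) (word : String) => if PySem.Str.len word > k then sum_over_k + 1 else sum_over_k)
        = (fun (sum_over_k : Int) (word : String) => if (fun w => decide (k < PySem.Str.len w)) word = true then sum_over_k + 1 else sum_over_k) by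
      funext s w; simp [GT.gt]]
  rw [PySem.List.foldl_if_add_one]
  rw [show (fun w => decide (k < PySem.Str.len w)) = ((fun w => decide (k < (w.length : Int))) ∘ String.toList) by
      funext w; simp [PySem.Str.len_eq]]
  rw [← List.countP_map, PySem.Str.split₀_map_toList]
  simp only [PySem.Str.toList_replace]
  rw [show ("." : String).toList = ['.'] from rfl, show ("," : String).toList = [','] from rfl,
      show ("?" : String).toList = ['?'] from rfl, show ("!" : String).toList = ['!'] from rfl,
      show (":" : String).toList = [':'] from rfl, show ("" : String).toList = [] from rfl]
  rw [replace_single, replace_single, replace_single, replace_single, replace_single, filter_chain]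
  simp

-- ===== VERDICT (by name: the statement is the Claim_ definition above) =====
theorem length_over_k_spec : Claim_equal_length_over_k := by
  intro sentence k _
  unfold Spec_length_over_k length_over_k_alt
  rw [fold_skip_punct]
  have := main_inv k (sentence.toList.filter (fun c => !bPunct c)) [] 0
  simp only [List.length_nil, Int.natCast_zero, zero_add] at this
  rw [portA_eq_count]
  simpa [finA, PySem.Chars.split₀] using this.symm
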